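-- pv_equiv track=rewrite | github.com/marcfyk/legal-case-retrieval | src/searchengine/util.py | _interleave_min
-- ===== SOURCE A (Python) =====
-- def _interleave_min(iterables):
--     '''
--     interleaves and generates a list of iterables,
--     and stops when the first iterable has been exhausted.
--     '''
--     if not len(iterables):
--         return
--     iterators = [iter(i) for i in iterables]
--     while 1:
--         for i in iterators:
--             try:
--                 yield next(i)
--             except StopIteration:
--                 return
-- ===== SOURCE B (Python) =====
-- def _interleave_min(iterables):
--     pools = [list(it) for it in iterables]
--     rounds = max((len(p) for p in pools), default=0)
--     for k in range(rounds):
--         for p in pools: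
--             if k >= len(p):
--                 return
--             yield p[k]
-- ===== Notes on version B (the rewrite author's own statement) =====
-- stated objective: idiomatic
-- what changed: Replaced the manual iterator list, infinite while-loop and try/except StopIteration with materialized pools, a precomputed round count and an index-based round loop that returns when an index passes a pool's length.
import Mathlib
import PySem

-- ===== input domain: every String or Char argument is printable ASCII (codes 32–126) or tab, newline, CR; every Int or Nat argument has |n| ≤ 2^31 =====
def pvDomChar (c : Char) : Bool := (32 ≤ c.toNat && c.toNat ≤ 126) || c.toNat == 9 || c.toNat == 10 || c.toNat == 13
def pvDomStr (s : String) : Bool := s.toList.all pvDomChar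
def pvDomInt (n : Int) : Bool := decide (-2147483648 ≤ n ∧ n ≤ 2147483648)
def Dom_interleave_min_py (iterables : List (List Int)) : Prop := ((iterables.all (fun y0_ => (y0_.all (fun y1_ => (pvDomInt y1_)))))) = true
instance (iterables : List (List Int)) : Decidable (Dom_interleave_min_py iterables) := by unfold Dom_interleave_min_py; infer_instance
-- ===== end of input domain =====

-- B replaces A's iterator list + infinite while + try/except StopIteration with
-- materialized pools and an index-based round loop (idiomatic decomposition; same cost).


-- ===== PORT A =====
-- one pass of A's inner `for i in iterators`: yields next() of each iterator in order;
-- `none` = a StopIteration fired (return), `some ts` = the advanced iterators (tails)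
def aRound : List (List Int) → List Int × Option (List (List Int))
  | [] => ([], some [])
  | l :: rest =>
    match l with
    | [] => ([], none)                   -- next(i) raises StopIteration → return
    | x :: xs =>
      match aRound rest with
      | (ys, none) => (x :: ys, none)
      | (ys, some ts) => (x :: ys, some (xs :: ts))

-- A's `while 1` loop; fuel (sum of lengths + 1) only makes the recursion total,
-- it is never hit before the loop returns
def aLoop : Nat → List (List Int) → List Int
  | 0, _ => []
  | fuel + 1, its =>
    match aRound its with
    | (ys, none) => ys
    | (ys, some ts) => ys ++ aLoop fuel ts

def interleave_min_py (iterables : List (List Int)) : List Int :=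
  if iterables.length = 0 then []
  else aLoop ((iterables.map List.length).sum + 1) iterables

-- ===== PORT B =====
-- max((len(p) for p in pools), default=0)
def pvMaxLen : List (List Int) → Nat
  | [] => 0
  | p :: r => max p.length (pvMaxLen r)

-- inner `for p in pools`: yield p[k] until k >= len(p); Bool = returned early
def bRow (k : Nat) : List (List Int) → List Int × Bool
  | [] => ([], false)
  | p :: rest =>
    if p.length ≤ k then ([], true)
    else
      match bRow k rest with
      | (ys, b) => (p.getD k 0 :: ys, b)

-- outer `for k in range(rounds)`
def bRounds (pools : List (List Int)) : List Nat → List Int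
  | [] => []
  | k :: ks =>
    match bRow k pools with
    | (ys, true) => ys
    | (ys, false) => ys ++ bRounds pools ks

def interleave_min_py_alt (iterables : List (List Int)) : List Int :=
  bRounds iterables (List.range (pvMaxLen iterables))

-- ===== PRECONDITION & SPEC =====
def Spec_interleave_min_py (iterables : List (List Int)) (out : List Int) : Prop := out = interleave_min_py_alt iterables
instance (iterables : List (List Int)) (out : List Int) : Decidable (Spec_interleave_min_py iterables out) := by unfold Spec_interleave_min_py; infer_instance

-- ===== CLAIM (what is proved, stated in full; the proofs are below) =====
def Claim_equal_interleave_min_py : Prop := ∀ (iterables : List (List Int)), Dom_interleave_min_py iterables → Spec_interleave_min_py iterables (interleave_min_py iterables)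

-- ===== LEMMAS AND PROOFS =====

theorem aLoop_nil (fuel : Nat) : aLoop fuel [] = [] := by
  induction fuel with
  | zero => rfl
  | succ n ih => simp [aLoop, aRound, ih]

-- aRound in terms of B's row at index 0
theorem aRound_eq_bRow (its : List (List Int)) :
    aRound its = ((bRow 0 its).1,
      if (bRow 0 its).2 then none else some (its.map List.tail)) := by
  induction its with
  | nil => rfl
  | cons p rest ih =>
    cases p with
    | nil => simp [aRound, bRow]
    | cons x xs =>
      simp only [aRound, bRow, ih]
      cases h : (bRow 0 rest).2 <;> simp [List.getD]

-- shifting the index by one = dropping one element from every pool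
theorem bRow_succ (k : Nat) (pools : List (List Int)) :
    bRow (k + 1) pools = bRow k (pools.map List.tail) := by
  induction pools with
  | nil => rfl
  | cons p rest ih =>
    cases p with
    | nil => simp [bRow]
    | cons x xs =>
      simp only [bRow, List.map, List.length_cons, List.tail_cons, ih]
      by_cases h : xs.length ≤ k
      · simp [h, Nat.succ_le_succ h]
      · have h' : ¬ (xs.length + 1 ≤ k + 1) := by omega
        simp [h, h', List.getD]

theorem bRounds_shift (pools : List (List Int)) (ks : List Nat) :
    bRounds pools (ks.map Nat.succ) = bRounds (pools.map List.tail) ks := by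
  induction ks with
  | nil => rfl
  | cons k ks ih =>
    simp only [List.map, bRounds, bRow_succ, ih]

theorem pvMaxLen_tail (pools : List (List Int)) :
    pvMaxLen (pools.map List.tail) = pvMaxLen pools - 1 := by
  induction pools with
  | nil => rfl
  | cons p rest ih =>
    simp only [List.map, pvMaxLen, ih, List.length_tail]
    omega

theorem bRow_false_nonempty (pools : List (List Int)) (h : (bRow 0 pools).2 = false) :
    ∀ p ∈ pools, p ≠ [] := by
  induction pools with
  | nil => intro p hp; simp at hp
  | cons q rest ih =>
    intro p hp
    cases q with
    | nil => simp [bRow] at h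
    | cons x xs =>
      simp only [bRow] at h
      have h' : (bRow 0 rest).2 = false := by
        by_cases hle : (x :: xs).length ≤ 0
        · simp at hle
        · simp only [if_neg hle] at h
          cases hb : bRow 0 rest with
          | mk ys b => simp [hb] at h; simp [h]
      rcases List.mem_cons.mp hp with rfl | hmem
      · simp
      · exact ih h' p hmem

theorem sum_tails (pools : List (List Int)) (h : ∀ p ∈ pools, p ≠ []) :
    ((pools.map List.tail).map List.length).sum + pools.length
      = (pools.map List.length).sum := by
  induction pools with
  | nil => rfl
  | cons p rest ih =>
    have hp : p ≠ [] := h p (by simp)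
    have hlen : 1 ≤ p.length := by
      cases p with
      | nil => exact absurd rfl hp
      | cons _ _ => simp
    have := ih (fun q hq => h q (List.mem_cons_of_mem _ hq))
    simp only [List.map, List.sum_cons, List.length_cons, List.length_tail]
    omega

-- main invariant: with enough fuel, A's loop equals B's round scan
theorem aLoop_eq_bRounds (fuel : Nat) :
    ∀ (pools : List (List Int)), (pools.map List.length).sum < fuel →
      aLoop fuel pools = bRounds pools (List.range (pvMaxLen pools)) := by
  induction fuel with
  | zero => intro pools h; omega
  | succ n ih =>
    intro pools hsum
    cases hm : pvMaxLen pools with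
    | zero =>
      -- every pool is empty
      cases pools with
      | nil => simp [aLoop_nil, bRounds]
      | cons p rest =>
        have hp : p = [] := by
          cases p with
          | nil => rfl
          | cons x xs => simp [pvMaxLen] at hm
        subst hp
        simp [aLoop, aRound, bRounds]
    | succ m =>
      rw [List.range_succ_eq_map]
      have hround := aRound_eq_bRow pools
      cases hb : (bRow 0 pools).2 with
      | true =>
        simp only [aLoop, hround, hb]
        simp only [bRounds]
        cases hrow : bRow 0 pools with
        | mk ys b => simp [hrow] at hb; simp [hb]
      | false =>
        have hne : ∀ p ∈ pools, p ≠ [] := bRow_false_nonempty pools hb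
        have hpne : pools ≠ [] := by
          intro hnil; subst hnil; simp [pvMaxLen] at hm
        have hlen1 : 1 ≤ pools.length := by
          cases pools with
          | nil => exact absurd rfl hpne
          | cons _ _ => simp
        have hsum' : ((pools.map List.tail).map List.length).sum < n := by
          have := sum_tails pools hne
          omega
        have htail := ih (pools.map List.tail) hsum'
        have hmt : pvMaxLen (pools.map List.tail) = m := by
          rw [pvMaxLen_tail, hm]; omega
        have hstep : aLoop (n + 1) pools = (bRow 0 pools).1 ++ aLoop n (pools.map List.tail) := by
          simp [aLoop, hround, hb]
        have hbr : bRounds pools (0 :: (List.range m).map Nat.succ)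
            = (bRow 0 pools).1 ++ bRounds (pools.map List.tail) (List.range m) := by
          cases hrow : bRow 0 pools with
          | mk ys b =>
            have hbf : b = false := by rw [hrow] at hb; exact hb
            subst hbf
            simp [bRounds, hrow, bRounds_shift]
        rw [hstep, hbr, htail, hmt]

theorem interleave_eq (its : List (List Int)) :
    interleave_min_py its = interleave_min_py_alt its := by
  unfold interleave_min_py interleave_min_py_alt
  cases its with
  | nil => simp [pvMaxLen, bRounds]
  | cons p rest =>
    rw [if_neg (by simp)]
    exact aLoop_eq_bRounds _ _ (Nat.lt_succ_self _)

-- ===== VERDICT (by name: the statement is the Claim_ definition above) =====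
theorem interleave_min_py_spec : Claim_equal_interleave_min_py := by
  intro its _
  unfold Spec_interleave_min_py
  exact interleave_eq its
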